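-- pv_equiv track=rewrite | github.com/Leegaeun1/coding-test | Programmers/Lv2/마법의 엘리베이터.py | solution
-- ===== SOURCE A (Python) =====
-- def solution(storey):
--     cnt = 0
--     while(storey>0):
--         num=storey%10
--         storey//=10
--         if num>5:
--             storey+=1
--             cnt+=10-num
--
--         elif num==5:
--             if storey%10<5:
--                 cnt+=10-num
--             else:
--                 storey+=1
--                 cnt+=num
--         else:
--             cnt+=num
--     return cnt
-- ===== SOURCE B (Python) =====
-- def solution(storey):
--     # Explore both choices per digit (round down vs round up with carry)
--     # and take the minimum, instead of A's greedy tie-broken decision.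
--     if storey <= 0:
--         return 0
--     if storey < 10:
--         return min(storey, 11 - storey)
--     d = storey % 10
--     q = storey // 10
--     return min(d + solution(q), (10 - d) + solution(q + 1))
-- ===== Notes on version B (the rewrite author's own statement) =====
-- stated objective: alternative
-- what changed: Replaces A's greedy per-digit loop with its explicit num==5 look-ahead tie-break by a recursion that tries both options at each digit (press down, or press up with a carry) and takes the minimum.
import Mathlib
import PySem

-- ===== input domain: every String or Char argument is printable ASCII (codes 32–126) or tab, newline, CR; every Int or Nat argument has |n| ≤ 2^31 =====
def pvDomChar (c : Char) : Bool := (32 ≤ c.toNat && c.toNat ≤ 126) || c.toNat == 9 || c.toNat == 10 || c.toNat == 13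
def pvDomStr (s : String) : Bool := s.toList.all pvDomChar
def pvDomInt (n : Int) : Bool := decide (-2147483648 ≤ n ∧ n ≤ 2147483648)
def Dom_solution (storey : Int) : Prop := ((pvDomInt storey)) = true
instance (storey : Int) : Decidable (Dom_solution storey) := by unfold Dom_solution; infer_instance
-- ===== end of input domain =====

-- B explores both per-digit options (down, or up with a carry) and takes the minimum,
-- instead of A's greedy decision with its num==5 look-ahead tie-break. Same cost; alternative algorithm.

-- ===== PORT A =====
-- the while loop of A, with cnt as accumulator
def solutionLoop (storey cnt : Int) : Int :=
  if _h : storey > 0 then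
    if h5 : PySem.Int.mod storey 10 > 5 then
      solutionLoop (PySem.Int.floordiv storey 10 + 1) (cnt + (10 - PySem.Int.mod storey 10))
    else if _he : PySem.Int.mod storey 10 = 5 then
      if hlt : PySem.Int.mod (PySem.Int.floordiv storey 10) 10 < 5 then
        solutionLoop (PySem.Int.floordiv storey 10) (cnt + (10 - PySem.Int.mod storey 10))
      else
        solutionLoop (PySem.Int.floordiv storey 10 + 1) (cnt + PySem.Int.mod storey 10)
    else
      solutionLoop (PySem.Int.floordiv storey 10) (cnt + PySem.Int.mod storey 10)
  else cnt
termination_by storey.toNat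
decreasing_by
  all_goals
    simp only [PySem.Int.mod_eq_emod_of_pos (by norm_num : (0:Int) < 10),
      PySem.Int.floordiv_eq_ediv_of_pos (by norm_num : (0:Int) < 10)] at *
  all_goals omega

def solution (storey : Int) : Int := solutionLoop storey 0

-- ===== PORT B =====
def solution_alt (storey : Int) : Int :=
  if storey ≤ 0 then 0
  else if storey < 10 then min storey (11 - storey)
  else
    let d := PySem.Int.mod storey 10
    let q := PySem.Int.floordiv storey 10
    min (d + solution_alt q) ((10 - d) + solution_alt (q + 1))
termination_by storey.toNat
decreasing_by
  all_goals
    simp only [PySem.Int.floordiv_eq_ediv_of_pos (by norm_num : (0:Int) < 10)] at *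
  · omega
  · omega

-- ===== PRECONDITION & SPEC =====
def Spec_solution (storey : Int) (out : Int) : Prop := out = solution_alt storey
instance (storey : Int) (out : Int) : Decidable (Spec_solution storey out) := by unfold Spec_solution; infer_instance

-- ===== CLAIM (what is proved, stated in full; the proofs are below) =====
def Claim_equal_solution : Prop := ∀ (storey : Int), Dom_solution storey → Spec_solution storey (solution storey)

-- ===== LEMMAS AND PROOFS =====

theorem alt_nonpos (n : Int) (hn : n ≤ 0) : solution_alt n = 0 := by
  rw [solution_alt]; simp [hn]

theorem alt_one : solution_alt 1 = 1 := by
  rw [solution_alt]; norm_num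

-- one unfolding step of B, valid for every positive n (for 1 ≤ n ≤ 9 it agrees with the base case)
theorem alt_step (n : Int) (hn : 0 < n) :
    solution_alt n = min (n % 10 + solution_alt (n / 10)) ((10 - n % 10) + solution_alt (n / 10 + 1)) := by
  by_cases h10 : n < 10
  · have hq : n / 10 = 0 := by omega
    have hm : n % 10 = n := by omega
    rw [hq, hm, alt_nonpos 0 (by norm_num), show (0:Int) + 1 = 1 from by norm_num, alt_one]
    conv_lhs => rw [solution_alt]
    simp only [show ¬ n ≤ 0 by omega, if_false, h10, if_true]
    omega
  · conv_lhs => rw [solution_alt]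
    simp only [show ¬ n ≤ 0 by omega, if_false, h10, if_false,
      PySem.Int.mod_eq_emod_of_pos (by norm_num : (0:Int) < 10),
      PySem.Int.floordiv_eq_ediv_of_pos (by norm_num : (0:Int) < 10)]

-- which branch of the min wins, given how far apart the two subresults can be
theorem alt_chr (n q d : Int) (hn : 0 < n) (hqd : n = 10 * q + d) (hd0 : 0 ≤ d) (hd9 : d < 10)
    (H1 : solution_alt (q + 1) ≤ solution_alt q + 1) (H2 : solution_alt q ≤ solution_alt (q + 1) + 1) :
    solution_alt n =
      if d ≤ 4 then d + solution_alt q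
      else if d = 5 then 5 + min (solution_alt q) (solution_alt (q + 1))
      else (10 - d) + solution_alt (q + 1) := by
  have h1 : n / 10 = q := by omega
  have h2 : n % 10 = d := by omega
  rw [alt_step n hn, h1, h2]
  split_ifs <;> omega

-- B's value moves by at most 1 between neighbours, and the direction is decided by the last digit
theorem alt_adj : ∀ (k : Nat),
    (solution_alt ((k : Int) + 1) ≤ solution_alt (k : Int) + 1) ∧
    (solution_alt (k : Int) ≤ solution_alt ((k : Int) + 1) + 1) ∧
    ((k : Int) % 10 ≤ 4 → solution_alt (k : Int) ≤ solution_alt ((k : Int) + 1)) ∧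
    (5 ≤ (k : Int) % 10 → solution_alt ((k : Int) + 1) ≤ solution_alt (k : Int)) := by
  intro k
  induction k using Nat.strong_induction_on with
  | _ k IH =>
    rcases Nat.eq_zero_or_pos k with hk0 | hk0
    · subst hk0
      rw [show ((0:Nat):Int) = 0 by norm_num, show (0:Int) + 1 = 1 by norm_num,
        alt_nonpos 0 (by norm_num), alt_one]
      norm_num
    · set m : Int := (k : Int) with hm
      have hmpos : 0 < m := by omega
      set d : Int := m % 10 with hd
      set q : Int := m / 10 with hq
      have hqd : m = 10 * q + d := by omega
      have hd09 : 0 ≤ d ∧ d < 10 := by omega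
      have hq0 : 0 ≤ q := by omega
      have hqk : q.toNat < k := by omega
      have IHq := IH q.toNat hqk
      rw [Int.toNat_of_nonneg hq0] at IHq
      have Hm := alt_chr m q d hmpos hqd hd09.1 hd09.2 IHq.1 IHq.2.1
      by_cases hd9 : d = 9
      · -- m+1 rolls over: last digit 0, quotient q+1
        have hq1k : (q + 1).toNat < k := by omega
        have IHq1 := IH (q + 1).toNat hq1k
        rw [Int.toNat_of_nonneg (by omega : (0:Int) ≤ q + 1)] at IHq1
        have Hm1 := alt_chr (m + 1) (q + 1) 0 (by omega) (by omega) (by norm_num) (by norm_num)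
          IHq1.1 IHq1.2.1
        rw [hd9] at Hm
        norm_num at Hm Hm1
        omega
      · -- m+1 has last digit d+1, same quotient
        have Hm1 := alt_chr (m + 1) q (d + 1) (by omega) (by omega) (by omega) (by omega)
          IHq.1 IHq.2.1
        -- IHq on q's last digit, needed for the d = 4 / d = 5 cases
        have hqadj := IHq.2.2
        split_ifs at Hm Hm1 <;> omega

theorem alt_adj' (q : Int) (hq : 0 ≤ q) :
    (solution_alt (q + 1) ≤ solution_alt q + 1) ∧
    (solution_alt q ≤ solution_alt (q + 1) + 1) ∧
    (q % 10 ≤ 4 → solution_alt q ≤ solution_alt (q + 1)) ∧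
    (5 ≤ q % 10 → solution_alt (q + 1) ≤ solution_alt q) := by
  have := alt_adj q.toNat
  rwa [Int.toNat_of_nonneg hq] at this

-- A's loop computes cnt plus B's value of the remaining storey
theorem loop_eq_alt : ∀ (k : Nat) (s c : Int), s.toNat = k → solutionLoop s c = c + solution_alt s := by
  intro k
  induction k using Nat.strong_induction_on with
  | _ k IH =>
    intro s c hs
    by_cases hpos : s > 0
    · set d : Int := s % 10 with hd
      set q : Int := s / 10 with hq
      have hqd : s = 10 * q + d := by omega
      have hd09 : 0 ≤ d ∧ d < 10 := by omega
      have hq0 : 0 ≤ q := by omega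
      have hadj := alt_adj' q hq0
      have Hs := alt_chr s q d hpos hqd hd09.1 hd09.2 hadj.1 hadj.2.1
      rw [solutionLoop]
      simp only [dif_pos hpos,
        PySem.Int.mod_eq_emod_of_pos (by norm_num : (0:Int) < 10),
        PySem.Int.floordiv_eq_ediv_of_pos (by norm_num : (0:Int) < 10)]
      rw [← hd, ← hq]
      by_cases h5 : d > 5
      · rw [dif_pos h5]
        rw [IH (q + 1).toNat (by omega) (q + 1) _ rfl]
        split_ifs at Hs <;> omega
      · rw [dif_neg h5]
        by_cases he5 : d = 5
        · rw [dif_pos he5]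
          by_cases hnx : q % 10 < 5
          · rw [dif_pos hnx]
            rw [IH q.toNat (by omega) q _ rfl]
            have := hadj.2.2.1 (by omega)
            split_ifs at Hs <;> omega
          · rw [dif_neg hnx]
            rw [IH (q + 1).toNat (by omega) (q + 1) _ rfl]
            have := hadj.2.2.2 (by omega)
            split_ifs at Hs <;> omega
        · rw [dif_neg he5]
          rw [IH q.toNat (by omega) q _ rfl]
          split_ifs at Hs <;> omega
    · rw [solutionLoop, dif_neg hpos, alt_nonpos s (by omega)]
      omega

-- ===== VERDICT (by name: the statement is the Claim_ definition above) =====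
theorem solution_spec : Claim_equal_solution := by
  intro storey _
  unfold Spec_solution solution
  rw [loop_eq_alt storey.toNat storey 0 rfl]
  omega
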